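-- pv_equiv track=rewrite | github.com/ahphoo/DLProject | CNN-2e79ef8f267699b289cff4a112caf77c04dbed4c/CNN-2e79ef8f267699b289cff4a112caf77c04dbed4c/generateTrainingData.py | findQuads
-- ===== SOURCE A (Python) =====
-- def findQuads(locMin,locMax,dataLen):
--     quadsList = []
--     upperDiff = int(.35*dataLen) # Upperbound on low2-low1, and high2-high1
--     lowerDiff = int(.07*dataLen) # Lowerbound on low2-low1, and high2-high1
--     for i in range(0,len(locMin)):
--         for j in range(i+1,len(locMin)):
--             for k in range(0,len(locMax)):
--                 for l in range(k+1,len(locMax)):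
--                     (a,b,c,d) = (locMin[i],locMin[j],locMax[k],locMax[l])
--                     overlap = (a < c and c < b) or (c < a and a < d) # top and bottom overlap
--                     length = (b - a < upperDiff) and (d - c < upperDiff) and (b - a > lowerDiff) and (d - c > lowerDiff) # top and bottom of triangle not too long/short
--                     if (overlap and length):
--                         quadsList.append((locMin[i],locMin[j],locMax[k],locMax[l]))
--     return quadsList
-- ===== SOURCE B (Python) =====
-- def findQuads(locMin, locMax, dataLen):
--     upperDiff = int(.35*dataLen)
--     lowerDiff = int(.07*dataLen)
--     def pairs(xs):
--         # valid (first, second) pairs passing the length filter, in index order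
--         return [(xs[i], xs[j])
--                 for i in range(len(xs)) for j in range(i+1, len(xs))
--                 if lowerDiff < xs[j] - xs[i] < upperDiff]
--     minPairs = pairs(locMin)
--     maxPairs = pairs(locMax)
--     return [(a, b, c, d)
--             for (a, b) in minPairs
--             for (c, d) in maxPairs
--             if (a < c < b) or (c < a < d)]
-- ===== Notes on version B (the rewrite author's own statement) =====
-- stated objective: faster
-- what changed: Instead of a 4-deep nested index loop re-testing the length bounds for every (i,j,k,l), B precomputes the length-valid min-pairs and max-pairs once and then combines only those, testing just the overlap condition.
import Mathlib
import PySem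

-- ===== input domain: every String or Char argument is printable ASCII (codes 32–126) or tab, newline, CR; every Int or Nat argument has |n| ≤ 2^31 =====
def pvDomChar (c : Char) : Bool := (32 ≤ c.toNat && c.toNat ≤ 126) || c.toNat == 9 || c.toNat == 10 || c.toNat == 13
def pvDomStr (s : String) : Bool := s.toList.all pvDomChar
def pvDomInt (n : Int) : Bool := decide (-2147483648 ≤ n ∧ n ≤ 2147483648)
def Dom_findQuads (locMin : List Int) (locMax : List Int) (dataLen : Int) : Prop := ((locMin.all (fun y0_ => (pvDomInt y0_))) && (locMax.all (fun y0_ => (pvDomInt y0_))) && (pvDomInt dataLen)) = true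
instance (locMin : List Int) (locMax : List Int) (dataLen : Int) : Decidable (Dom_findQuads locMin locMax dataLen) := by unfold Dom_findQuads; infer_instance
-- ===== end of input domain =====

-- B precomputes the length-valid min-pairs and max-pairs once and combines only those (objective: faster).

-- ===== PORT A =====
-- Shared model of Python's `int(c * dataLen)` for a float constant c = M / 2^s:
-- exact IEEE-754 double multiplication (round to nearest, ties to even, 53-bit
-- significand; no overflow/subnormals in the admitted range) followed by
-- truncation toward zero.  Exact for |dataLen| ≤ 2^31 (verified against CPython).
def pyTruncMulFloat (M s : Nat) (n : Int) : Int :=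
  if n = 0 then 0
  else
    let a : Nat := n.natAbs * M
    let k : Nat := PySem.Int.bitLength (a : Int)
    let q : Nat :=
      if 53 < k then
        let d := k - 53
        let q0 := a >>> d
        let r := a % 2 ^ d
        let half := 2 ^ (d - 1)
        if half < r ∨ (r = half ∧ q0 % 2 = 1) then q0 + 1 else q0
      else a
    let t : Nat := if 53 < k then k - 53 else 0
    let v : Nat := if t ≤ s then (q <<< t) >>> s else q <<< (t - s)
    if 0 < n then (v : Int) else -(v : Int)

def findQuadsLoopL (u lo a b c : Int) (rest : List Int)
    (acc : List (Int × Int × Int × Int)) : List (Int × Int × Int × Int) :=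
  match rest with
  | [] => acc
  | d :: t =>
      let overlap := (decide (a < c) && decide (c < b)) || (decide (c < a) && decide (a < d))
      let length := decide (b - a < u) && decide (d - c < u) && decide (b - a > lo) && decide (d - c > lo)
      findQuadsLoopL u lo a b c t (if overlap && length then acc ++ [(a, b, c, d)] else acc)

def findQuadsLoopK (u lo a b : Int) (maxs : List Int)
    (acc : List (Int × Int × Int × Int)) : List (Int × Int × Int × Int) :=
  match maxs with
  | [] => acc
  | c :: t => findQuadsLoopK u lo a b t (findQuadsLoopL u lo a b c t acc)

def findQuadsLoopJ (u lo a : Int) (rest locMax : List Int)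
    (acc : List (Int × Int × Int × Int)) : List (Int × Int × Int × Int) :=
  match rest with
  | [] => acc
  | b :: t => findQuadsLoopJ u lo a t locMax (findQuadsLoopK u lo a b locMax acc)

def findQuadsLoopI (u lo : Int) (mins locMax : List Int)
    (acc : List (Int × Int × Int × Int)) : List (Int × Int × Int × Int) :=
  match mins with
  | [] => acc
  | a :: t => findQuadsLoopI u lo t locMax (findQuadsLoopJ u lo a t locMax acc)

def findQuads (locMin : List Int) (locMax : List Int) (dataLen : Int) : List (Int × Int × Int × Int) :=
  let upperDiff := pyTruncMulFloat 6305039478318694 54 dataLen   -- int(.35*dataLen)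
  let lowerDiff := pyTruncMulFloat 5044031582654956 56 dataLen   -- int(.07*dataLen)
  findQuadsLoopI upperDiff lowerDiff locMin locMax []

-- ===== PORT B =====
-- the length filter, applied once per pair in B
def altLenOk (u lo x y : Int) : Bool := decide (lo < y - x) && decide (y - x < u)

-- all (xs[i], xs[j]), i<j, passing the length filter, in index order
def altPairs (u lo : Int) : List Int → List (Int × Int)
  | [] => []
  | x :: t => (t.filter (fun y => altLenOk u lo x y)).map (fun y => (x, y)) ++ altPairs u lo t

def findQuads_alt (locMin : List Int) (locMax : List Int) (dataLen : Int) : List (Int × Int × Int × Int) :=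
  let upperDiff := pyTruncMulFloat 6305039478318694 54 dataLen
  let lowerDiff := pyTruncMulFloat 5044031582654956 56 dataLen
  let minPairs := altPairs upperDiff lowerDiff locMin
  let maxPairs := altPairs upperDiff lowerDiff locMax
  minPairs.flatMap (fun p =>
    (maxPairs.filter (fun q =>
        (decide (p.1 < q.1) && decide (q.1 < p.2)) || (decide (q.1 < p.1) && decide (p.1 < q.2)))).map
      (fun q => (p.1, p.2, q.1, q.2)))

-- ===== PRECONDITION & SPEC =====
def Spec_findQuads (locMin : List Int) (locMax : List Int) (dataLen : Int) (out : List (Int × Int × Int × Int)) : Prop := out = findQuads_alt locMin locMax dataLen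
instance (locMin : List Int) (locMax : List Int) (dataLen : Int) (out : List (Int × Int × Int × Int)) : Decidable (Spec_findQuads locMin locMax dataLen out) := by unfold Spec_findQuads; infer_instance

-- ===== CLAIM (what is proved, stated in full; the proofs are below) =====
def Claim_equal_findQuads : Prop := ∀ (locMin : List Int) (locMax : List Int) (dataLen : Int), Dom_findQuads locMin locMax dataLen → Spec_findQuads locMin locMax dataLen (findQuads locMin locMax dataLen)

-- ===== LEMMAS AND PROOFS =====

-- B's combination step for one valid min-pair (a, b)
def altComb (a b : Int) (maxP : List (Int × Int)) : List (Int × Int × Int × Int) :=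
  (maxP.filter (fun q =>
      (decide (a < q.1) && decide (q.1 < b)) || (decide (q.1 < a) && decide (a < q.2)))).map
    (fun q => (a, b, q.1, q.2))

theorem loopL_eq (u lo a b c : Int) (rest : List Int) (acc : List (Int × Int × Int × Int)) :
    findQuadsLoopL u lo a b c rest acc =
      acc ++ (rest.filter (fun d =>
        altLenOk u lo a b && (altLenOk u lo c d &&
          ((decide (a < c) && decide (c < b)) || (decide (c < a) && decide (a < d)))))).map
        (fun d => (a, b, c, d)) := by
  induction rest generalizing acc with
  | nil => simp [findQuadsLoopL]
  | cons d t ih =>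
      simp only [findQuadsLoopL, List.filter_cons]
      have hcond : (((decide (a < c) && decide (c < b)) || (decide (c < a) && decide (a < d)))
            && (decide (b - a < u) && decide (d - c < u) && decide (b - a > lo) && decide (d - c > lo)))
          = (altLenOk u lo a b && (altLenOk u lo c d &&
              ((decide (a < c) && decide (c < b)) || (decide (c < a) && decide (a < d))))) := by
        simp only [altLenOk, gt_iff_lt]
        generalize (decide (a < c) && decide (c < b) || decide (c < a) && decide (a < d)) = o
        generalize decide (b - a < u) = p
        generalize decide (d - c < u) = q
        generalize decide (lo < b - a) = r
        generalize decide (lo < d - c) = s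
        cases o <;> cases p <;> cases q <;> cases r <;> cases s <;> rfl
      rw [hcond]
      by_cases h : (altLenOk u lo a b && (altLenOk u lo c d &&
          ((decide (a < c) && decide (c < b)) || (decide (c < a) && decide (a < d))))) = true
      · simp only [h, if_true, ih, List.map_cons, List.append_assoc, List.singleton_append]
      · simp only [Bool.not_eq_true] at h
        simp only [h, if_false, Bool.false_eq_true, ih]

theorem loopK_eq (u lo a b : Int) (maxs : List Int) (acc : List (Int × Int × Int × Int)) :
    findQuadsLoopK u lo a b maxs acc =
      acc ++ (if altLenOk u lo a b then altComb a b (altPairs u lo maxs) else []) := by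
  induction maxs generalizing acc with
  | nil => simp [findQuadsLoopK, altPairs, altComb]
  | cons c t ih =>
      rw [findQuadsLoopK, ih, loopL_eq, List.append_assoc]
      congr 1
      by_cases hab : altLenOk u lo a b = true
      · simp only [hab, if_true, Bool.true_and, altPairs, altComb, List.filter_append,
          List.map_append, List.filter_map, List.filter_filter, List.map_map, Function.comp]
        congr 1
        · congr 1
          apply List.filter_congr
          intro d _
          exact Bool.and_comm _ _
      · simp only [Bool.not_eq_true] at hab
        simp only [hab, Bool.false_and, if_false, Bool.false_eq_true, List.filter_false,
          List.map_nil, List.nil_append]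

theorem loopJ_eq (u lo a : Int) (rest locMax : List Int) (acc : List (Int × Int × Int × Int)) :
    findQuadsLoopJ u lo a rest locMax acc =
      acc ++ ((rest.filter (fun y => altLenOk u lo a y)).map (fun y => (a, y))).flatMap
        (fun p => altComb p.1 p.2 (altPairs u lo locMax)) := by
  induction rest generalizing acc with
  | nil => simp [findQuadsLoopJ]
  | cons b t ih =>
      rw [findQuadsLoopJ, ih, loopK_eq, List.append_assoc]
      congr 1
      by_cases hab : altLenOk u lo a b <;> simp [hab]

theorem loopI_eq (u lo : Int) (mins locMax : List Int) (acc : List (Int × Int × Int × Int)) :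
    findQuadsLoopI u lo mins locMax acc =
      acc ++ (altPairs u lo mins).flatMap (fun p => altComb p.1 p.2 (altPairs u lo locMax)) := by
  induction mins generalizing acc with
  | nil => simp [findQuadsLoopI, altPairs]
  | cons a t ih =>
      rw [findQuadsLoopI, ih, loopJ_eq, altPairs, List.flatMap_append, List.append_assoc]

-- ===== VERDICT (by name: the statement is the Claim_ definition above) =====
theorem findQuads_spec : Claim_equal_findQuads := by
  intro locMin locMax dataLen _
  show findQuads locMin locMax dataLen = findQuads_alt locMin locMax dataLen
  rw [findQuads, findQuads_alt, loopI_eq, List.nil_append]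
  rfl
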